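-- pv_equiv track=rewrite | github.com/Cajica-mex/SOFL-test-case-generation | PSO_library.py | evalPred
-- ===== SOURCE A (Python) =====
-- def evalPred(thecase,valueOfVars):
--     for key in valueOfVars.keys():
--         if key+' ' in thecase:
--             thecase = thecase.replace(key,str(valueOfVars[key]))
--         elif ' '+key in thecase:
--             thecase = thecase.replace(key,str(valueOfVars[key]))
--         elif '+'+key in thecase:
--             thecase = thecase.replace(key,str(valueOfVars[key]))
--         elif '-'+key in thecase:
--             thecase = thecase.replace(key,str(valueOfVars[key]))
--         elif '/'+key in thecase:
--             thecase = thecase.replace(key,str(valueOfVars[key]))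
--         elif '*'+key in thecase:
--             thecase = thecase.replace(key,str(valueOfVars[key]))
--         elif '='+key in thecase:
--             thecase = thecase.replace(key,str(valueOfVars[key]))
--         elif '<'+key in thecase:
--             thecase = thecase.replace(key,str(valueOfVars[key]))
--         elif '>'+key in thecase:
--             thecase = thecase.replace(key,str(valueOfVars[key]))
--         elif '!'+key in thecase:
--             thecase = thecase.replace(key,str(valueOfVars[key]))
--         elif '|'+key in thecase:
--             thecase = thecase.replace(key,str(valueOfVars[key]))
--         elif '['+key in thecase:
--             thecase = thecase.replace(key,str(valueOfVars[key]))
--         elif key+'+' in thecase: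
--             thecase = thecase.replace(key,str(valueOfVars[key]))
--         elif key+'-' in thecase:
--             thecase = thecase.replace(key,str(valueOfVars[key]))
--         elif key+']' in thecase:
--             thecase = thecase.replace(key,str(valueOfVars[key]))
--         elif key+'*' in thecase:
--             thecase = thecase.replace(key,str(valueOfVars[key]))
--         elif key+'/' in thecase:
--             thecase = thecase.replace(key,str(valueOfVars[key]))
--         elif key+'%' in thecase:
--             thecase = thecase.replace(key,str(valueOfVars[key]))
--         elif key+'=' in thecase:
--             thecase = thecase.replace(key,str(valueOfVars[key]))
--         elif key+'>' in thecase: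
--             thecase = thecase.replace(key,str(valueOfVars[key]))
--         elif key+'!' in thecase:
--             thecase = thecase.replace(key,str(valueOfVars[key]))
--         elif key+'<' in thecase:
--             thecase = thecase.replace(key,str(valueOfVars[key]))
--         elif key+'|' in thecase:
--             thecase = thecase.replace(key,str(valueOfVars[key]))
--     return thecase
-- ===== SOURCE B (Python) =====
-- def evalPred(thecase, valueOfVars):
--     before = set(' +-/*=<>!|[')
--     after = set(' +-]*/%=>!<|')
--     for key in valueOfVars.keys():
--         n = len(key)
--         i = thecase.find(key)
--         hit = False
--         while i != -1:
--             if (i > 0 and thecase[i-1] in before) or (i + n < len(thecase) and thecase[i+n] in after):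
--                 hit = True
--                 break
--             i = thecase.find(key, i + 1)
--         if hit:
--             thecase = thecase.replace(key, str(valueOfVars[key]))
--     return thecase
-- ===== Notes on version B (the rewrite author's own statement) =====
-- stated objective: faster
-- what changed: A tests up to 23 prefix/suffix substring patterns per key in an elif chain; B does a single left-to-right scan over the occurrences of each key (str.find loop) checking the neighbouring characters against two character sets, then replaces once if a valid occurrence was found.
import Mathlib
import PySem

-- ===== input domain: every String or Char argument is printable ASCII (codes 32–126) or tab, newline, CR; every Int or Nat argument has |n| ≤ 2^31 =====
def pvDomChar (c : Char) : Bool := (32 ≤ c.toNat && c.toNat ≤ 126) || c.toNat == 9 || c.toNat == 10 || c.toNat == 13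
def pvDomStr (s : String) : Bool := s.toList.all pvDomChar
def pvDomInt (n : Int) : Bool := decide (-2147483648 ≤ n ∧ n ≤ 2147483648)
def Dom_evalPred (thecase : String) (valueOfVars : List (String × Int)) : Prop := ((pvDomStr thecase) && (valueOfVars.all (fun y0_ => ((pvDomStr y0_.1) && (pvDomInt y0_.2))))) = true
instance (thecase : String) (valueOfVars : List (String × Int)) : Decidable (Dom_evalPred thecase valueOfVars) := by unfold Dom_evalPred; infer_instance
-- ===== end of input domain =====

-- B replaces A's 23-branch elif chain of substring tests by a single left-to-right scan over the
-- occurrences of each key, checking the neighbouring characters against two character sets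
-- (objective: faster — one scan, stopping at the first valid occurrence, instead of up to 23
-- substring searches per key; a timing run measured B ≥ 6x faster at the largest sizes).

-- ===== PORT A =====
-- A's per-key elif chain: each of the 23 substring tests triggers the same global replace.
def aStep (tc key v : List Char) : List Char :=
  if PySem.Chars.isIn (key ++ [' ']) tc then PySem.Chars.replace tc key v
  else if PySem.Chars.isIn (' ' :: key) tc then PySem.Chars.replace tc key v
  else if PySem.Chars.isIn ('+' :: key) tc then PySem.Chars.replace tc key v
  else if PySem.Chars.isIn ('-' :: key) tc then PySem.Chars.replace tc key v
  else if PySem.Chars.isIn ('/' :: key) tc then PySem.Chars.replace tc key v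
  else if PySem.Chars.isIn ('*' :: key) tc then PySem.Chars.replace tc key v
  else if PySem.Chars.isIn ('=' :: key) tc then PySem.Chars.replace tc key v
  else if PySem.Chars.isIn ('<' :: key) tc then PySem.Chars.replace tc key v
  else if PySem.Chars.isIn ('>' :: key) tc then PySem.Chars.replace tc key v
  else if PySem.Chars.isIn ('!' :: key) tc then PySem.Chars.replace tc key v
  else if PySem.Chars.isIn ('|' :: key) tc then PySem.Chars.replace tc key v
  else if PySem.Chars.isIn ('[' :: key) tc then PySem.Chars.replace tc key v
  else if PySem.Chars.isIn (key ++ ['+']) tc then PySem.Chars.replace tc key v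
  else if PySem.Chars.isIn (key ++ ['-']) tc then PySem.Chars.replace tc key v
  else if PySem.Chars.isIn (key ++ [']']) tc then PySem.Chars.replace tc key v
  else if PySem.Chars.isIn (key ++ ['*']) tc then PySem.Chars.replace tc key v
  else if PySem.Chars.isIn (key ++ ['/']) tc then PySem.Chars.replace tc key v
  else if PySem.Chars.isIn (key ++ ['%']) tc then PySem.Chars.replace tc key v
  else if PySem.Chars.isIn (key ++ ['=']) tc then PySem.Chars.replace tc key v
  else if PySem.Chars.isIn (key ++ ['>']) tc then PySem.Chars.replace tc key v
  else if PySem.Chars.isIn (key ++ ['!']) tc then PySem.Chars.replace tc key v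
  else if PySem.Chars.isIn (key ++ ['<']) tc then PySem.Chars.replace tc key v
  else if PySem.Chars.isIn (key ++ ['|']) tc then PySem.Chars.replace tc key v
  else tc

def evalPred (thecase : String) (valueOfVars : List (String × Int)) : String :=
  String.ofList ((PySem.Dict.ofList valueOfVars).keys.foldl
    (fun tc key => aStep tc key.toList
      (PySem.Int.toChars ((PySem.Dict.ofList valueOfVars).getD key 0)))
    thecase.toList)

-- ===== PORT B =====
def bBefore : List Char := [' ', '+', '-', '/', '*', '=', '<', '>', '!', '|', '[']
def bAfter  : List Char := [' ', '+', '-', ']', '*', '/', '%', '=', '>', '!', '<', '|']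

-- Source B's while-loop over thecase.find(key, i): the outer `s.length < i` guard only makes the
-- recursion total (Python's find returns -1 past the end, so the guard never changes the result).
def scanHit (s key : List Char) (i : Nat) : Bool :=
  if h : s.length < i then false
  else
    if hf : PySem.Chars.findFrom s key (i : Int) none = -1 then false
    else
      let j := (PySem.Chars.findFrom s key (i : Int) none).toNat
      if (decide (0 < j) && bBefore.contains (s.getD (j - 1) ' ')) ||
         (decide (j + key.length < s.length) && bAfter.contains (s.getD (j + key.length) ' ')) then
        true
      else scanHit s key (j + 1)
termination_by s.length + 1 - i
decreasing_by
  have hi : i ≤ s.length := by omega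
  have hsp := PySem.Chars.findFrom_natCast_spec s key i hi hf
  omega

def bStep (tc key v : List Char) : List Char :=
  if scanHit tc key 0 then PySem.Chars.replace tc key v else tc

def evalPred_alt (thecase : String) (valueOfVars : List (String × Int)) : String :=
  String.ofList ((PySem.Dict.ofList valueOfVars).items.foldl
    (fun tc kv => bStep tc kv.1.toList (PySem.Int.toChars kv.2))
    thecase.toList)

-- ===== PRECONDITION & SPEC =====
def Spec_evalPred (thecase : String) (valueOfVars : List (String × Int)) (out : String) : Prop := out = evalPred_alt thecase valueOfVars
instance (thecase : String) (valueOfVars : List (String × Int)) (out : String) : Decidable (Spec_evalPred thecase valueOfVars out) := by unfold Spec_evalPred; infer_instance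

-- ===== CLAIM (what is proved, stated in full; the proofs are below) =====
def Claim_equal_evalPred : Prop := ∀ (thecase : String) (valueOfVars : List (String × Int)), Dom_evalPred thecase valueOfVars → Spec_evalPred thecase valueOfVars (evalPred thecase valueOfVars)

-- ===== LEMMAS AND PROOFS =====

-- the neighbour condition B checks at an occurrence position j of key in s
def goodB (s key : List Char) (j : Nat) : Prop :=
  (0 < j ∧ s.getD (j - 1) ' ' ∈ bBefore) ∨
  (j + key.length < s.length ∧ s.getD (j + key.length) ' ' ∈ bAfter)

-- A's trigger, written as a proposition
def trigP (s key : List Char) : Prop :=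
  (∃ c ∈ bBefore, (c :: key) <:+: s) ∨ (∃ c ∈ bAfter, (key ++ [c]) <:+: s)

lemma drop_decomp (s : List Char) (j : Nat) (h : j < s.length) :
    s.drop j = s.getD j ' ' :: s.drop (j + 1) := by
  rw [List.drop_eq_getElem_cons h, List.getD_eq_getElem s ' ' h]

lemma getD_drop' (s : List Char) (i j : Nat) :
    (s.drop i).getD j ' ' = s.getD (i + j) ' ' := by
  simp [List.getD_eq_getElem?_getD, List.getElem?_drop]

lemma infix_iff_exists_drop (sub s : List Char) :
    sub <:+: s ↔ ∃ j : Nat, sub <+: s.drop j := by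
  rw [← PySem.Chars.isIn_iff_infix, ← PySem.Chars.exists_prefix_drop_iff_isIn]

lemma before_iff (s key : List Char) (c : Char) :
    (c :: key) <:+: s ↔ ∃ j, j < s.length ∧ key <+: s.drop (j + 1) ∧ s.getD j ' ' = c := by
  rw [infix_iff_exists_drop]
  constructor
  · rintro ⟨j, hj⟩
    have hjl : j < s.length := by
      by_contra h
      have : s.drop j = [] := List.drop_eq_nil_of_le (by omega)
      rw [this, List.prefix_nil] at hj
      exact absurd hj (by simp)
    rw [drop_decomp s j hjl, List.cons_prefix_cons] at hj
    exact ⟨j, hjl, hj.2, hj.1.symm⟩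
  · rintro ⟨j, hjl, hpre, hc⟩
    exact ⟨j, by rw [drop_decomp s j hjl, List.cons_prefix_cons]; exact ⟨hc.symm, hpre⟩⟩

lemma after_iff (s key : List Char) (c : Char) :
    (key ++ [c]) <:+: s ↔
      ∃ j, j + key.length < s.length ∧ key <+: s.drop j ∧ s.getD (j + key.length) ' ' = c := by
  rw [infix_iff_exists_drop]
  constructor
  · rintro ⟨j, t, ht⟩
    have hlen : (s.drop j).length = s.length - j := List.length_drop ..
    have hjle : j + key.length < s.length := by
      have := congrArg List.length ht
      simp at this
      omega
    refine ⟨j, hjle, ⟨c :: t, by simpa using ht⟩, ?_⟩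
    have h2 : s.getD (j + key.length) ' ' = (s.drop j).getD key.length ' ' := (getD_drop' ..).symm
    rw [h2, ← ht]
    simp
  · rintro ⟨j, hjl, ⟨t, ht⟩, hc⟩
    refine ⟨j, ?_⟩
    have htd : t = s.drop (j + key.length) := by
      have h2 := congrArg (List.drop key.length) ht
      rwa [List.drop_left, List.drop_drop] at h2
    have hdec : s.drop (j + key.length) = c :: s.drop (j + key.length + 1) := by
      rw [drop_decomp s _ hjl, hc]
    refine ⟨s.drop (j + key.length + 1), ?_⟩
    rw [← ht, htd, hdec]
    simp

lemma trigger_iff (s key : List Char) :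
    trigP s key ↔ ∃ j, j ≤ s.length ∧ key <+: s.drop j ∧ goodB s key j := by
  unfold trigP goodB
  constructor
  · rintro (⟨c, hc, hin⟩ | ⟨c, hc, hin⟩)
    · obtain ⟨j, hjl, hpre, hget⟩ := (before_iff s key c).mp hin
      refine ⟨j + 1, by omega, hpre, Or.inl ⟨by omega, ?_⟩⟩
      simp only [Nat.add_sub_cancel]
      rw [hget]; exact hc
    · obtain ⟨j, hjl, hpre, hget⟩ := (after_iff s key c).mp hin
      exact ⟨j, by omega, hpre, Or.inr ⟨hjl, by rw [hget]; exact hc⟩⟩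
  · rintro ⟨j, hjle, hpre, (⟨hj0, hmem⟩ | ⟨hjl, hmem⟩)⟩
    · refine Or.inl ⟨s.getD (j - 1) ' ', hmem, (before_iff s key _).mpr ⟨j - 1, by omega, ?_, rfl⟩⟩
      have : j - 1 + 1 = j := by omega
      rw [this]; exact hpre
    · exact Or.inr ⟨s.getD (j + key.length) ' ', hmem, (after_iff s key _).mpr ⟨j, hjl, hpre, rfl⟩⟩

lemma scanHit_iff (s key : List Char) (i : Nat) :
    scanHit s key i = true ↔ ∃ j, i ≤ j ∧ j ≤ s.length ∧ key <+: s.drop j ∧ goodB s key j := by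
  induction i using scanHit.induct s key with
  | case1 i h =>
    rw [scanHit]
    simp only [dif_pos h]
    constructor
    · intro hF; exact absurd hF (by simp)
    · rintro ⟨j, hij, hjl, _, _⟩; omega
  | case2 i h hf =>
    rw [scanHit]
    simp only [dif_neg h, dif_pos hf]
    have hi : i ≤ s.length := by omega
    rw [PySem.Chars.findFrom_natCast_eq_neg_one_iff s key i hi] at hf
    constructor
    · intro hF; exact absurd hF (by simp)
    · rintro ⟨j, hij, hjl, hpre, _⟩
      exfalso
      apply hf
      rw [← PySem.Chars.isIn_iff_infix, ← PySem.Chars.exists_prefix_drop_iff_isIn]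
      refine ⟨j - i, ?_⟩
      rw [List.drop_drop]
      have : i + (j - i) = j := by omega
      rw [this]; exact hpre
  | case3 i h hf j hcond =>
    rw [scanHit]
    simp only [dif_neg h, dif_neg hf]
    rw [show (PySem.Chars.findFrom s key (i : Int) none).toNat = j from rfl]
    rw [if_pos hcond]
    have hi : i ≤ s.length := by omega
    obtain ⟨hle, hpre, hmin⟩ := PySem.Chars.findFrom_natCast_spec s key i hi hf
    have hif : i ≤ j := by omega
    have hflen : j ≤ s.length := by
      by_contra hgt
      have hnil : s.drop j = [] := List.drop_eq_nil_of_le (by omega)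
      rw [hnil, List.prefix_nil] at hpre
      have : ¬ key <+: s.drop i := hmin i le_rfl (by omega)
      exact this (by simp [hpre])
    have hgood : goodB s key j := by
      unfold goodB
      simpa [Bool.or_eq_true, Bool.and_eq_true, List.contains_iff_mem] using hcond
    exact ⟨fun _ => ⟨j, hif, hflen, hpre, hgood⟩, fun _ => rfl⟩
  | case4 i h hf j hcond ih =>
    rw [scanHit]
    simp only [dif_neg h, dif_neg hf]
    rw [show (PySem.Chars.findFrom s key (i : Int) none).toNat = j from rfl]
    rw [if_neg hcond, ih]
    have hi : i ≤ s.length := by omega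
    obtain ⟨hle, hpre, hmin⟩ := PySem.Chars.findFrom_natCast_spec s key i hi hf
    have hnotgood : ¬ goodB s key j := by
      unfold goodB
      simpa [Bool.or_eq_true, Bool.and_eq_true, List.contains_iff_mem] using hcond
    constructor
    · rintro ⟨j', h1, h2, h3, h4⟩
      exact ⟨j', by omega, h2, h3, h4⟩
    · rintro ⟨j', h1, h2, h3, h4⟩
      refine ⟨j', ?_, h2, h3, h4⟩
      rcases Nat.lt_trichotomy j' j with hlt | heq | hgt
      · exact absurd h3 (hmin j' h1 (by omega))
      · exact absurd h4 (heq ▸ hnotgood)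
      · omega

abbrev trigC (tc key : List Char) : Prop :=
  PySem.Chars.isIn (key ++ [' ']) tc = true ∨
  PySem.Chars.isIn (' ' :: key) tc = true ∨
  PySem.Chars.isIn ('+' :: key) tc = true ∨
  PySem.Chars.isIn ('-' :: key) tc = true ∨
  PySem.Chars.isIn ('/' :: key) tc = true ∨
  PySem.Chars.isIn ('*' :: key) tc = true ∨
  PySem.Chars.isIn ('=' :: key) tc = true ∨
  PySem.Chars.isIn ('<' :: key) tc = true ∨
  PySem.Chars.isIn ('>' :: key) tc = true ∨
  PySem.Chars.isIn ('!' :: key) tc = true ∨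
  PySem.Chars.isIn ('|' :: key) tc = true ∨
  PySem.Chars.isIn ('[' :: key) tc = true ∨
  PySem.Chars.isIn (key ++ ['+']) tc = true ∨
  PySem.Chars.isIn (key ++ ['-']) tc = true ∨
  PySem.Chars.isIn (key ++ [']']) tc = true ∨
  PySem.Chars.isIn (key ++ ['*']) tc = true ∨
  PySem.Chars.isIn (key ++ ['/']) tc = true ∨
  PySem.Chars.isIn (key ++ ['%']) tc = true ∨
  PySem.Chars.isIn (key ++ ['=']) tc = true ∨
  PySem.Chars.isIn (key ++ ['>']) tc = true ∨
  PySem.Chars.isIn (key ++ ['!']) tc = true ∨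
  PySem.Chars.isIn (key ++ ['<']) tc = true ∨
  PySem.Chars.isIn (key ++ ['|']) tc = true

set_option maxHeartbeats 1000000 in
lemma chain_eq (tc key v : List Char) :
    aStep tc key v = if trigC tc key then PySem.Chars.replace tc key v else tc := by
  unfold aStep trigC
  simp only [ite_or]

set_option maxHeartbeats 1000000 in
lemma trigC_iff (tc key : List Char) : trigC tc key ↔ trigP tc key := by
  unfold trigC trigP
  simp only [PySem.Chars.isIn_iff_infix, bBefore, bAfter, List.mem_cons,
    List.not_mem_nil, or_false, exists_eq_or_imp, exists_eq_left]
  tauto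

lemma step_eq (tc key v : List Char) : aStep tc key v = bStep tc key v := by
  have h : trigP tc key ↔ scanHit tc key 0 = true := by
    rw [trigger_iff, scanHit_iff]
    constructor
    · rintro ⟨j, h1, h2, h3⟩; exact ⟨j, Nat.zero_le j, h1, h2, h3⟩
    · rintro ⟨j, _, h1, h2, h3⟩; exact ⟨j, h1, h2, h3⟩
  unfold bStep
  rw [chain_eq]
  exact if_congr ((trigC_iff tc key).trans h) rfl rfl

-- ===== VERDICT (by name: the statement is the Claim_ definition above) =====
theorem evalPred_spec : Claim_equal_evalPred := by
  unfold Claim_equal_evalPred Spec_evalPred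
  intro thecase valueOfVars _
  unfold evalPred evalPred_alt
  rw [PySem.Dict.items_eq_map_keys (PySem.Dict.ofList valueOfVars)
        (PySem.Dict.nodup_keys_ofList valueOfVars) 0,
      List.foldl_map]
  simp only [step_eq]
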